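-- pv_equiv track=rewrite | github.com/giosaavedra/giosaavedra | alarm_clock/models.py | _normalize_days
-- ===== SOURCE A (Python) =====
-- from typing import Dict, Iterable, Optional, Tuple
--
-- def _normalize_days(days: Optional[Iterable[int]]) -> Tuple[int, ...]:
--     if not days:
--         return tuple()
--     seen = set()
--     normalized = []
--     for day in days:
--         if day < 0 or day > 6:
--             raise ValueError("Weekday indexes must be between 0 (Monday) and 6 (Sunday)")
--         if day not in seen:
--             seen.add(day)
--             normalized.append(day)
--     return tuple(sorted(normalized))
-- ===== SOURCE B (Python) =====
-- from typing import Iterable, Optional, Tuple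
--
-- def _normalize_days(days: Optional[Iterable[int]]) -> Tuple[int, ...]:
--     if not days:
--         return tuple()
--     present = [False] * 7
--     for day in days:
--         if day < 0 or day > 6:
--             raise ValueError("Weekday indexes must be between 0 (Monday) and 6 (Sunday)")
--         present[day] = True
--     return tuple(i for i in range(7) if present[i])
-- ===== Notes on version B (the rewrite author's own statement) =====
-- stated objective: idiomatic
-- what changed: Replaces the seen-set dedup plus final sort with a fixed 7-slot presence array marked in one pass and read back by an ordered scan of indices 0..6, so no set and no sort are needed.
import Mathlib
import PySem

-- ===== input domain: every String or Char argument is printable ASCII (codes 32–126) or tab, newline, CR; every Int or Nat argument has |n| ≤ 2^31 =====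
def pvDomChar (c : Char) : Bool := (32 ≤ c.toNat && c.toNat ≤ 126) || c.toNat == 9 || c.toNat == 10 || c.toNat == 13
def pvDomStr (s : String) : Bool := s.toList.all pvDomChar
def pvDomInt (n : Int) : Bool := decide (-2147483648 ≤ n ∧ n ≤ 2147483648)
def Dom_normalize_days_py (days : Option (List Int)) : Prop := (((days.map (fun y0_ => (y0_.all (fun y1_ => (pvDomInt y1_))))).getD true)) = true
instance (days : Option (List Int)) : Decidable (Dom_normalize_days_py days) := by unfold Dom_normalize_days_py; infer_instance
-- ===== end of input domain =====

-- B replaces A's seen-set dedup plus final sort with a fixed 7-slot presence array and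
-- an ordered scan of indices 0..6 (idiomatic; return value only, no mutation involved).

-- ===== PORT A =====
-- loop of A: seen set + normalized list in order; none = ValueError on an out-of-range day
def pvALoop : List Int → PySem.Set Int → List Int → Option (List Int)
  | [], _, norm => some norm
  | d :: rest, seen, norm =>
    if d < 0 ∨ d > 6 then none
    else if PySem.Set.contains seen d then pvALoop rest seen norm
    else pvALoop rest (PySem.Set.add seen d) (norm ++ [d])

def normalize_days_py (days : Option (List Int)) : List Int :=
  match days with
  | none => []
  | some l =>
    if l = [] then []
    else
      match pvALoop l PySem.Set.empty [] with
      | none => []   -- ValueError: excluded by Pre_normalize_days_py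
      | some norm => PySem.List.sorted norm (fun x => x) false

-- ===== PORT B =====
-- loop of B: mark present[day] := true; none = ValueError on an out-of-range day
def pvBLoop : List Int → List Bool → Option (List Bool)
  | [], pres => some pres
  | d :: rest, pres =>
    if d < 0 ∨ d > 6 then none
    else pvBLoop rest (pres.set d.toNat true)

def normalize_days_py_alt (days : Option (List Int)) : List Int :=
  match days with
  | none => []
  | some l =>
    if l = [] then []
    else
      match pvBLoop l (List.replicate 7 false) with
      | none => []   -- ValueError: excluded by Pre_normalize_days_py
      | some pres => ((List.range 7).filter (fun i => pres.getD i false)).map (fun (i : Nat) => (i : Int))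

-- ===== PRECONDITION & SPEC =====
-- Pre_ excludes exactly the inputs on which A raises ValueError: a list containing a day
-- outside 0..6 (A raises before returning anything there).
def Pre_normalize_days_py (days : Option (List Int)) : Prop :=
  ∀ d ∈ days.getD [], 0 ≤ d ∧ d ≤ 6
instance (days : Option (List Int)) : Decidable (Pre_normalize_days_py days) := by unfold Pre_normalize_days_py; infer_instance

def pvWitness_normalize_days_py : Option (List Int) := some [3, 1, 3, 0, 6]

def Spec_normalize_days_py (days : Option (List Int)) (out : List Int) : Prop := out = normalize_days_py_alt days
instance (days : Option (List Int)) (out : List Int) : Decidable (Spec_normalize_days_py days out) := by unfold Spec_normalize_days_py; infer_instance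

-- ===== CLAIM (what is proved, stated in full; the proofs are below) =====
def Claim_equal_normalize_days_py : Prop := ∀ (days : Option (List Int)), Dom_normalize_days_py days → Pre_normalize_days_py days → Spec_normalize_days_py days (normalize_days_py days)

-- ===== LEMMAS AND PROOFS =====

-- A's loop with seen = normalized (they are updated identically) computes Set.update
lemma pvALoop_eq_update : ∀ (l : List Int) (s : PySem.Set Int),
    (∀ d ∈ l, 0 ≤ d ∧ d ≤ 6) → pvALoop l s s = some (PySem.Set.update s l) := by
  intro l
  induction l with
  | nil => intro s _; simp [pvALoop, PySem.Set.update]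
  | cons d rest ih =>
    intro s h
    have hd := h d (List.mem_cons_self)
    have hrest : ∀ x ∈ rest, 0 ≤ x ∧ x ≤ 6 := fun x hx => h x (List.mem_cons_of_mem _ hx)
    simp only [pvALoop, PySem.Set.update, List.foldl_cons]
    rw [if_neg (by omega)]
    by_cases hc : PySem.Set.contains s d
    · rw [if_pos hc]
      have hmem : d ∈ s := by simpa using hc
      have : PySem.Set.add s d = s := by simp [PySem.Set.add, hmem]
      rw [this] at *
      simpa [PySem.Set.update] using ih s hrest
    · rw [if_neg hc]
      have hmem : d ∉ s := by simpa using hc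
      have : PySem.Set.add s d = s ++ [d] := by simp [PySem.Set.add, hmem]
      rw [← this]
      simpa [PySem.Set.update] using ih (PySem.Set.add s d) hrest

-- B's loop returns a length-7 mask: slot i is old value OR (i occurs in l)
lemma pvBLoop_spec : ∀ (l : List Int) (pres : List Bool),
    (∀ d ∈ l, 0 ≤ d ∧ d ≤ 6) → pres.length = 7 →
    ∃ pres', pvBLoop l pres = some pres' ∧ pres'.length = 7 ∧
      ∀ i : Nat, i < 7 → pres'.getD i false = (pres.getD i false || decide ((i : Int) ∈ l)) := by
  intro l
  induction l with
  | nil => intro pres _ hlen; exact ⟨pres, rfl, hlen, by simp⟩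
  | cons d rest ih =>
    intro pres h hlen
    have hd := h d (List.mem_cons_self)
    have hrest : ∀ x ∈ rest, 0 ≤ x ∧ x ≤ 6 := fun x hx => h x (List.mem_cons_of_mem _ hx)
    have hset : (pres.set d.toNat true).length = 7 := by simp [hlen]
    obtain ⟨p', hrun, hlen', hget⟩ := ih (pres.set d.toNat true) hrest hset
    refine ⟨p', ?_, hlen', ?_⟩
    · simp only [pvBLoop]; rw [if_neg (by omega)]; exact hrun
    · intro i hi
      have hdn : d.toNat < 7 := by omega
      rw [hget i hi]
      by_cases hid : i = d.toNat
      · have h1 : (pres.set d.toNat true).getD i false = true := by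
          rw [hid, List.getD_eq_getElem _ _ (by simp [hlen]; omega)]
          simp
        rw [h1]
        have h2 : (i : Int) = d := by omega
        simp [h2]
      · have : (pres.set d.toNat true).getD i false = pres.getD i false := by
          rcases Nat.lt_or_ge i pres.length with hlt | hge
          · rw [List.getD_eq_getElem _ _ (by simpa using hlt), List.getD_eq_getElem _ _ hlt]
            exact List.getElem_set_ne (fun h => hid h.symm) _
          · rw [List.getD_eq_default _ _ (by simpa using hge), List.getD_eq_default _ _ hge]
        rw [this]
        have hne : (i : Int) ≠ d := by omega
        simp [List.mem_cons, hne]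

-- the ordered index scan of B names exactly sorted(set(l)) of A
lemma filter_range_eq_sorted (l : List Int) (hl : ∀ d ∈ l, 0 ≤ d ∧ d ≤ 6) :
    ((List.range 7).filter (fun (i : Nat) => decide ((i : Int) ∈ l))).map (fun (i : Nat) => (i : Int))
      = PySem.List.sorted (PySem.Set.ofList l) (fun x => x) false := by
  set ys := ((List.range 7).filter (fun (i : Nat) => decide ((i : Int) ∈ l))).map (fun (i : Nat) => (i : Int)) with hys
  have hnodup : ys.Nodup := by
    apply List.Nodup.map
    · intro a b hab; simpa using hab
    · exact (List.nodup_range).filter _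
  have hmem : ∀ x, x ∈ ys ↔ x ∈ PySem.Set.ofList l := by
    intro x
    rw [PySem.Set.mem_ofList]
    constructor
    · intro hx
      obtain ⟨i, hi, rfl⟩ := List.mem_map.mp hx
      exact (List.mem_filter.mp hi).2 |> of_decide_eq_true
    · intro hx
      have hb := hl x hx
      refine List.mem_map.mpr ⟨x.toNat, List.mem_filter.mpr ⟨?_, ?_⟩, by omega⟩
      · exact List.mem_range.mpr (by omega)
      · simp only [decide_eq_true_eq]
        have : ((x.toNat : Int)) = x := by omega
        rwa [this]
  have hperm : ys.Perm (PySem.Set.ofList l) :=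
    (List.perm_ext_iff_of_nodup hnodup (PySem.Set.nodup_ofList l)).mpr hmem
  have hpair : ys.Pairwise (fun a b => a < b) := by
    apply List.Pairwise.map
    · intro a b (h : a < b); simpa using h
    · exact (List.pairwise_lt_range).filter _
  exact (PySem.List.sorted_eq_of_perm_of_pairwise_lt _ _ _ hperm hpair).symm

-- ===== VERDICT (by name: the statement is the Claim_ definition above) =====
theorem normalize_days_py_spec : Claim_equal_normalize_days_py := by
  intro days _ hpre
  unfold Spec_normalize_days_py normalize_days_py normalize_days_py_alt
  match days with
  | none => rfl
  | some l =>
    by_cases hnil : l = []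
    · simp [hnil]
    · simp only [if_neg hnil]
      have hl : ∀ d ∈ l, 0 ≤ d ∧ d ≤ 6 := hpre
      have hA : pvALoop l PySem.Set.empty [] = some (PySem.Set.ofList l) := by
        have := pvALoop_eq_update l PySem.Set.empty hl
        simpa [PySem.Set.empty, PySem.Set.ofList_eq_foldl, PySem.Set.update] using this
      obtain ⟨p', hrun, hlen', hget⟩ := pvBLoop_spec l (List.replicate 7 false) hl (by simp)
      simp only [hA, hrun]
      have hfilter : (List.range 7).filter (fun i => p'.getD i false)
          = (List.range 7).filter (fun (i : Nat) => decide ((i : Int) ∈ l)) := by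
        apply List.filter_congr
        intro i hi
        have hi7 : i < 7 := List.mem_range.mp hi
        rw [hget i hi7]
        have hrep : (List.replicate 7 false).getD i false = false := by
          interval_cases i <;> rfl
        rw [hrep]
        simp
      rw [hfilter, filter_range_eq_sorted l hl]
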